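-- pv_equiv track=rewrite | github.com/zidan0x266/Ganesan-Group | tools/analysis_lithiumcore.py | subasso
-- ===== SOURCE A (Python) =====
-- from collections import Counter
--
-- def subasso(ASSO):
--     """
--     This function outputs the analysis for association relationship of
--     a given sub-domain.
--
--     Process a single frame.
--     """
--     assoAC = []  # total associations
--     firstion = True
--     for i in range(len(ASSO)):
--         if firstion:
--             t1 = 0
--             atom0 = ASSO[0][0]
--             firstion = False
--         atom1, atom2 = ASSO[i]
--         if atom1 == atom0:
--             t1 += 1
--         else:
--             assoAC.append(t1)
--             t1 = 0
--             t1 += 1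
--             atom0 = atom1
--     return Counter(assoAC)
-- ===== SOURCE B (Python) =====
-- from collections import Counter
--
--
-- def subasso(ASSO):
--     """Tally association run lengths by boundary positions and differencing.
--
--     Instead of a stateful counting loop, locate the positions where the first
--     element changes (run boundaries) by pairwise comparison, then recover the
--     run lengths as differences of consecutive boundary positions.  Zipping
--     [0]+cuts with cuts naturally yields one length per boundary, i.e. every
--     run except the unterminated final one, exactly as the original tallies.
--     """
--     firsts = [a for a, _ in ASSO]
--     cuts = [i + 1 for i, (x, y) in enumerate(zip(firsts, firsts[1:])) if x != y]
--     lengths = [j - i for i, j in zip([0] + cuts, cuts)]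
--     return Counter(lengths)
-- ===== Notes on version B (the rewrite author's own statement) =====
-- stated objective: alternative
-- what changed: Replaces A's stateful run-counting loop (firstion/t1/atom0 state machine) by a staged boundary-differencing computation: find the change positions of the first elements by pairwise comparison, then obtain the tallied run lengths as differences of consecutive boundary positions.
import Mathlib
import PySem

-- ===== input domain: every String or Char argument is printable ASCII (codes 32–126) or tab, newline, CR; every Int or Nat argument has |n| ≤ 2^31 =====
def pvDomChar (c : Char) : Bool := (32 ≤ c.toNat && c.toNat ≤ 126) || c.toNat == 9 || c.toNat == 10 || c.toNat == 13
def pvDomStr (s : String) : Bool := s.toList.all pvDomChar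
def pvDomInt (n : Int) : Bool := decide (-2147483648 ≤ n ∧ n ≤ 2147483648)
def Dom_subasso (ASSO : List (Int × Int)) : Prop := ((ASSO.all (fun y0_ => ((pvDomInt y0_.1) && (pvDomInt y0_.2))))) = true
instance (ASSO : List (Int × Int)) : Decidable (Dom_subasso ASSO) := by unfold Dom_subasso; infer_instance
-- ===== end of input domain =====

-- B replaces A's stateful run-counting loop by a staged boundary-differencing
-- computation: change positions of the first elements found by pairwise
-- comparison, run lengths recovered as differences of consecutive boundaries;
-- objective: alternative.

-- ===== PORT A =====
-- one loop step of A: state is (assoAC, firstion, t1, atom0); p is ASSO[i]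
def subassoStep (ASSO : List (Int × Int)) (s : List Int × Bool × Int × Int)
    (p : Int × Int) : List Int × Bool × Int × Int :=
  let (assoAC, firstion, t1, atom0) := s
  let (t1, atom0, firstion) :=
    if firstion then ((0 : Int), (PySem.List.pyGetD ASSO 0 (0, 0)).1, false)
    else (t1, atom0, firstion)
  let atom1 := p.1
  if atom1 == atom0 then (assoAC, firstion, t1 + 1, atom0)
  else (assoAC ++ [t1], firstion, 1, atom1)

def subasso (ASSO : List (Int × Int)) : List (Int × Int) :=
  let st := (PySem.List.pyRange 0 (ASSO.length : Int) 1).foldl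
      (fun s i => subassoStep ASSO s (PySem.List.pyGetD ASSO i (0, 0)))
      ([], true, 0, 0)
  (PySem.Dict.counter st.1).items

-- ===== PORT B =====
def subasso_alt (ASSO : List (Int × Int)) : List (Int × Int) :=
  let firsts := ASSO.map Prod.fst
  let cuts := (PySem.List.enumerate (firsts.zip (PySem.List.slice firsts (some 1) none))).filterMap
      (fun p => if p.2.1 ≠ p.2.2 then some (p.1 + 1) else none)
  let lengths := (((0 : Int) :: cuts).zip cuts).map (fun p => p.2 - p.1)
  (PySem.Dict.counter lengths).items

-- ===== PRECONDITION & SPEC =====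
def Spec_subasso (ASSO : List (Int × Int)) (out : List (Int × Int)) : Prop := out = subasso_alt ASSO
instance (ASSO : List (Int × Int)) (out : List (Int × Int)) : Decidable (Spec_subasso ASSO out) := by unfold Spec_subasso; infer_instance

-- ===== CLAIM (what is proved, stated in full; the proofs are below) =====
def Claim_equal_subasso : Prop := ∀ (ASSO : List (Int × Int)), Dom_subasso ASSO → Spec_subasso ASSO (subasso ASSO)

-- ===== LEMMAS AND PROOFS =====

-- run lengths of `l` continuing a current run of value `a` with count `k`
def pvGo (a k : Int) : List Int → List Int
  | [] => [k]
  | b :: l => if b == a then pvGo a (k + 1) l else k :: pvGo b 1 l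

lemma pvGo_ne_nil (a k : Int) (l : List Int) : pvGo a k l ≠ [] := by
  induction l generalizing a k with
  | nil => simp [pvGo]
  | cons b l ih => simp only [pvGo]; split <;> simp [ih]

-- boundary positions of `l` continuing a run of value `a`, next position `pos`
def pvCuts (a pos : Int) : List Int → List Int
  | [] => []
  | b :: l => if b == a then pvCuts b (pos + 1) l else pos :: pvCuts b (pos + 1) l

-- consecutive differences with previous value p
def pvDiffs (p : Int) : List Int → List Int
  | [] => []
  | c :: cs => (c - p) :: pvDiffs c cs

lemma zip_map_sub_eq_pvDiffs (p : Int) (cs : List Int) :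
    (((p :: cs).zip cs).map (fun q => q.2 - q.1)) = pvDiffs p cs := by
  induction cs generalizing p with
  | nil => rfl
  | cons c cs ih => simp only [List.zip_cons_cons, List.map_cons, pvDiffs, ih]

-- B's filterMap over the enumerated pairwise zip computes pvCuts
lemma enum_filterMap_eq_pvCuts (a : Int) (l : List Int) (s : Int) :
    ((PySem.List.enumerate ((a :: l).zip l) s).filterMap
      (fun p => if p.2.1 ≠ p.2.2 then some (p.1 + 1) else none)) = pvCuts a (s + 1) l := by
  induction l generalizing a s with
  | nil => rfl
  | cons b l ih =>
    simp only [List.zip_cons_cons, PySem.List.enumerate_cons, List.filterMap_cons]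
    by_cases h : a = b
    · subst h
      simp only [ne_eq, not_true_eq_false, if_false, pvCuts, beq_self_eq_true, if_true]
      rw [ih a (s + 1)]
    · have hb : (b == a) = false := by simp [Ne.symm h]
      simp only [ne_eq, h, not_false_eq_true, if_true, pvCuts, hb,
        Bool.false_eq_true, if_false]
      rw [ih b (s + 1)]

-- differencing the boundary positions gives all run lengths but the last
lemma pvDiffs_pvCuts (l : List Int) (a k pos : Int) :
    pvDiffs (pos - k) (pvCuts a pos l) = (pvGo a k l).dropLast := by
  induction l generalizing a k pos with
  | nil => simp [pvCuts, pvGo, pvDiffs]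
  | cons b l ih =>
    simp only [pvCuts, pvGo]
    by_cases h : b = a
    · subst h
      simp only [beq_self_eq_true, if_true]
      have := ih b (k + 1) (pos + 1)
      have e : pos + 1 - (k + 1) = pos - k := by ring
      rw [e] at this
      exact this
    · have hb : (b == a) = false := by simp [h]
      simp only [hb, Bool.false_eq_true, if_false, pvDiffs]
      rw [List.dropLast_cons_of_ne_nil (pvGo_ne_nil b 1 l)]
      have := ih b 1 (pos + 1)
      have e : pos + 1 - 1 = pos := by ring
      rw [e] at this
      rw [this]
      congr 1
      ring

-- unfolding lemmas for one A loop step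
lemma subassoStep_false (ASSO : List (Int × Int)) (acc : List Int) (k a : Int) (p : Int × Int) :
    subassoStep ASSO (acc, false, k, a) p =
      if p.1 == a then (acc, false, k + 1, a) else (acc ++ [k], false, 1, p.1) := rfl

lemma subassoStep_true (ASSO : List (Int × Int)) (acc : List Int) (k a : Int) (p : Int × Int) :
    subassoStep ASSO (acc, true, k, a) p =
      (if p.1 == (PySem.List.pyGetD ASSO 0 (0, 0)).1
        then (acc, false, (0 : Int) + 1, (PySem.List.pyGetD ASSO 0 (0, 0)).1)
        else (acc ++ [(0 : Int)], false, 1, p.1)) := rfl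

-- A's loop (with firstion already consumed) accumulates all run lengths but the last
lemma foldl_step_eq (ASSO l : List (Int × Int)) (acc : List Int) (k a : Int) :
    (l.foldl (subassoStep ASSO) (acc, false, k, a)).1 =
      acc ++ (pvGo a k (l.map Prod.fst)).dropLast := by
  induction l generalizing acc k a with
  | nil => simp [pvGo]
  | cons p l ih =>
    simp only [List.foldl_cons, List.map_cons, pvGo, subassoStep_false]
    by_cases h : p.1 = a
    · simp only [h, beq_self_eq_true, if_true]
      exact ih acc (k + 1) a
    · have hb : (p.1 == a) = false := by simp [h]
      simp only [hb, Bool.false_eq_true, if_false]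
      rw [ih]
      rw [List.dropLast_cons_of_ne_nil (pvGo_ne_nil p.1 1 (l.map Prod.fst))]
      simp

lemma assoAC_eq (ASSO : List (Int × Int)) :
    (ASSO.foldl (subassoStep ASSO) ([], true, 0, 0)).1 =
      match ASSO with
      | [] => []
      | x :: rest => (pvGo x.1 1 (rest.map Prod.fst)).dropLast := by
  cases ASSO with
  | nil => simp
  | cons x rest =>
    have h0 : (PySem.List.pyGetD (x :: rest) (0 : Int) ((0 : Int), (0 : Int))) = x := by
      simp [pysem]
    have hstep : subassoStep (x :: rest) ([], true, 0, 0) x = ([], false, 1, x.1) := by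
      rw [subassoStep_true, h0]
      simp
    simp only [List.foldl_cons, hstep]
    simpa using foldl_step_eq (x :: rest) rest [] 1 x.1

-- B's lengths list equals the same dropLast of run lengths
lemma lengths_eq (ASSO : List (Int × Int)) :
    (let firsts := ASSO.map Prod.fst
     let cuts := (PySem.List.enumerate (firsts.zip (PySem.List.slice firsts (some 1) none))).filterMap
        (fun p => if p.2.1 ≠ p.2.2 then some (p.1 + 1) else none)
     (((0 : Int) :: cuts).zip cuts).map (fun p => p.2 - p.1)) =
      match ASSO with
      | [] => []
      | x :: rest => (pvGo x.1 1 (rest.map Prod.fst)).dropLast := by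
  cases ASSO with
  | nil => rfl
  | cons x rest =>
    simp only [List.map_cons, PySem.List.slice_from_one, List.tail_cons]
    rw [enum_filterMap_eq_pvCuts x.1 (rest.map Prod.fst) 0]
    rw [zip_map_sub_eq_pvDiffs]
    have := pvDiffs_pvCuts (rest.map Prod.fst) x.1 1 (0 + 1)
    simpa using this

-- ===== VERDICT (by name: the statement is the Claim_ definition above) =====
theorem subasso_spec : Claim_equal_subasso := by
  intro ASSO _
  show _ = _
  unfold subasso subasso_alt
  rw [PySem.List.foldl_pyRange_zero_pyGetD']
  exact congrArg (fun l => (PySem.Dict.counter l).items)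
    ((assoAC_eq ASSO).trans (lengths_eq ASSO).symm)
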